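-- pv_equiv track=rewrite | github.com/raindue9/rzy009 | Hatespeech.py | is_hate
-- ===== SOURCE A (Python) =====
-- def is_hate(output_data):
--     hate_count = 0
--     Nhate_count = 0
--     for hateful_value in output_data['Hateful']:  # 遍历 'Hateful' 列
--         if hateful_value == 'hate':
--             hate_count += 1
--         elif hateful_value == 'non-hate':
--             Nhate_count += 1
--     return [hate_count, Nhate_count]
-- ===== SOURCE B (Python) =====
-- def is_hate(output_data):
--     def counts(col):
--         # divide and conquer: split the column, count each half, add the results
--         if not col:
--             return (0, 0)
--         if len(col) == 1:
--             v = col[0]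
--             return (1 if v == 'hate' else 0, 1 if v == 'non-hate' else 0)
--         mid = len(col) // 2
--         a, b = counts(col[:mid])
--         c, d = counts(col[mid:])
--         return (a + c, b + d)
--     h, n = counts(list(output_data['Hateful']))
--     return [h, n]
-- ===== Notes on version B (the rewrite author's own statement) =====
-- stated objective: alternative
-- what changed: Replaces A's single accumulation loop with branching counters by a divide-and-conquer recursion that splits the column in halves, counts each half recursively, and adds the pair results.
import Mathlib
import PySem

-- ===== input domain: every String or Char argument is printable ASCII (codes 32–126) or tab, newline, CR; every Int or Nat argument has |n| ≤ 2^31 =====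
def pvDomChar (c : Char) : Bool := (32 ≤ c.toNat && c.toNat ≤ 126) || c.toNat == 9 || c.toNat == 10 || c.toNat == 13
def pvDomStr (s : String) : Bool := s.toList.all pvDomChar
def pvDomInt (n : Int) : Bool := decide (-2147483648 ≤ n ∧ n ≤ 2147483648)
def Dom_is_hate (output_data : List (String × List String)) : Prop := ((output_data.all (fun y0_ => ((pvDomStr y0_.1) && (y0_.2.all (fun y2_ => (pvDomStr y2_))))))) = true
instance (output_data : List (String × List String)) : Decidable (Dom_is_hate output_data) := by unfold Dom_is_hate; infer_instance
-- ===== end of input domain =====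

-- B replaces A's single branching accumulation loop by a divide-and-conquer recursion
-- (split the column in halves, count each half, add the pairs); alternative, same result.

-- ===== PORT A =====
-- A's loop: two counters updated by an if/elif chain over output_data['Hateful'].
def is_hate (output_data : List (String × List String)) : List Int :=
  match PySem.Dict.get? ⟨output_data⟩ "Hateful" with
  | none => []  -- unreachable under Pre_is_hate (Python raises KeyError here)
  | some col =>
      let st := col.foldl (fun (acc : Int × Int) hateful_value =>
        if hateful_value == "hate" then (acc.1 + 1, acc.2)
        else if hateful_value == "non-hate" then (acc.1, acc.2 + 1)
        else acc) (0, 0)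
      [st.1, st.2]

-- ===== PORT B =====
-- B's recursive helper 'counts': base cases for [] and [v], otherwise split at mid = len//2.
-- col[:mid] / col[mid:] with 0 ≤ mid ≤ len are exactly List.take mid / List.drop mid.
def pvCountsB : List String → Int × Int
  | [] => (0, 0)
  | [v] => ((if v = "hate" then 1 else 0), (if v = "non-hate" then 1 else 0))
  | x :: y :: rest =>
      let col := x :: y :: rest
      let mid := col.length / 2
      let p := pvCountsB (col.take mid)
      let q := pvCountsB (col.drop mid)
      (p.1 + q.1, p.2 + q.2)
termination_by col => col.length
decreasing_by
  · simp [List.length_take]; omega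
  · simp [List.length_drop]; omega

def is_hate_alt (output_data : List (String × List String)) : List Int :=
  match PySem.Dict.get? ⟨output_data⟩ "Hateful" with
  | none => []  -- unreachable under Pre_is_hate (Python raises KeyError here)
  | some col =>
      let hn := pvCountsB col
      [hn.1, hn.2]

-- ===== PRECONDITION & SPEC =====
-- Pre_ excludes exactly the inputs with no 'Hateful' key, on which Python A (and B) raises KeyError.
def Pre_is_hate (output_data : List (String × List String)) : Prop :=
  (PySem.Dict.get? ⟨output_data⟩ "Hateful").isSome = true
instance (output_data : List (String × List String)) : Decidable (Pre_is_hate output_data) := by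
  unfold Pre_is_hate; infer_instance

def pvWitness_is_hate : (List (String × List String)) :=
  [("Hateful", ["hate", "non-hate", "hate", "other"])]

def Spec_is_hate (output_data : List (String × List String)) (out : List Int) : Prop := out = is_hate_alt output_data
instance (output_data : List (String × List String)) (out : List Int) : Decidable (Spec_is_hate output_data out) := by unfold Spec_is_hate; infer_instance

-- ===== CLAIM (what is proved, stated in full; the proofs are below) =====
def Claim_equal_is_hate : Prop := ∀ (output_data : List (String × List String)), Dom_is_hate output_data → Pre_is_hate output_data → Spec_is_hate output_data (is_hate output_data)

-- ===== LEMMAS AND PROOFS =====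

-- B's divide-and-conquer helper computes the two element counts.
theorem pvCountsB_eq_counts (col : List String) :
    pvCountsB col = ((col.count "hate" : Int), (col.count "non-hate" : Int)) := by
  induction col using pvCountsB.induct with
  | case1 => rw [pvCountsB]; simp
  | case2 v =>
      by_cases h1 : v = "hate" <;> by_cases h2 : v = "non-hate" <;>
        simp_all [pvCountsB]
  | case3 x y rest _col _mid ih1 ih2 =>
      rw [pvCountsB]
      rw [ih1, ih2]
      rw [Prod.mk.injEq]
      constructor <;> rw [← Nat.cast_add, ← List.count_append, List.take_append_drop]

-- A's paired-counter loop computes the same two counts.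
theorem pvFoldl_pair_counts (col : List String) (h n : Int) :
    col.foldl (fun (acc : Int × Int) v =>
        if v == "hate" then (acc.1 + 1, acc.2)
        else if v == "non-hate" then (acc.1, acc.2 + 1)
        else acc) (h, n)
      = (h + (col.count "hate" : Int), n + (col.count "non-hate" : Int)) := by
  induction col generalizing h n with
  | nil => simp
  | cons x xs ih =>
      simp only [List.foldl_cons, beq_iff_eq] at ih ⊢
      by_cases hx : x = "hate"
      · rw [if_pos hx, ih]
        simp [hx, Prod.ext_iff]
        omega
      · by_cases hn : x = "non-hate"
        · rw [if_neg hx, if_pos hn, ih]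
          simp [hn, Prod.ext_iff]
          omega
        · rw [if_neg hx, if_neg hn, ih]
          simp [hx, hn]

-- ===== VERDICT (by name: the statement is the Claim_ definition above) =====
theorem is_hate_spec : Claim_equal_is_hate := by
  intro output_data _ hpre
  unfold Pre_is_hate at hpre
  obtain ⟨col, hg⟩ := Option.isSome_iff_exists.mp hpre
  unfold Spec_is_hate is_hate is_hate_alt
  rw [hg]
  have hc := pvFoldl_pair_counts col 0 0
  simp only [beq_iff_eq] at hc
  simp [hc, pvCountsB_eq_counts col]
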